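-- pv_equiv track=rewrite | github.com/honu-shell-utions/python | sandbox/project_euler/751-800/788_dominating_numbers01.py | is_dominating
-- ===== SOURCE A (Python) =====
-- def is_dominating(n):
--     digit_count = [0]*10
--     str_n = str(n)
--     for d in str_n:
--         digit_count[int(d)] += 1
--     if max(digit_count) > len(str_n) // 2:
--         return True
--     else:
--         return False
-- ===== SOURCE B (Python) =====
-- def is_dominating(n):
--     digits = sorted(int(d) for d in str(n))
--     best = run = 0
--     prev = None
--     for d in digits:
--         run = run + 1 if d == prev else 1
--         if run > best:
--             best = run
--         prev = d
--     return best > len(digits) // 2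
-- ===== Notes on version B (the rewrite author's own statement) =====
-- stated objective: alternative
-- what changed: instead of tallying digit frequencies into a fixed per-digit count array and taking its max, B sorts the digits and finds the longest run of equal adjacent digits with a single run-length scan
import Mathlib
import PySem

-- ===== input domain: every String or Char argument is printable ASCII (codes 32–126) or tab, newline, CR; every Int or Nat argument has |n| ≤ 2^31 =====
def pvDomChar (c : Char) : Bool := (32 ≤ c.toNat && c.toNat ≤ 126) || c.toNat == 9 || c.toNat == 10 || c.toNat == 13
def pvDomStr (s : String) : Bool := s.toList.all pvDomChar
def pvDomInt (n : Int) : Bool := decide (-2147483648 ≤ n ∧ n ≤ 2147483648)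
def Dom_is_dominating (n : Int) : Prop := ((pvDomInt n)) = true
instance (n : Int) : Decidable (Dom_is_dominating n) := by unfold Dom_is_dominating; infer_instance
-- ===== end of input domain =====

-- B replaces A's fixed per-digit tally array by sorting the digits and scanning the sorted
-- list for the longest run of equal adjacent digits (alternative algorithm; not faster).


-- ===== PORT A =====
-- digit_count[int(d)] += 1 ; the `none` branch is where Python's int(d) raises ValueError
-- (excluded by Pre_is_dominating).
def pvStepA (acc : List Int) (d : Char) : List Int :=
  match PySem.Int.ofChars? [d] with
  | some i => acc.set i.toNat (acc.getD i.toNat 0 + 1)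
  | none => acc

def is_dominating (n : Int) : Bool :=
  let str_n := PySem.Int.toChars n
  let digit_count := str_n.foldl pvStepA (List.replicate 10 (0 : Int))
  match PySem.List.max? digit_count (fun x => x) with
  | some m => decide (m > PySem.Int.floordiv (str_n.length : Int) 2)
  | none => false   -- unreachable: digit_count always has 10 entries

-- ===== PORT B =====
-- state = (best, run, prev); `run = run + 1 if d == prev else 1`, then `if run > best: best = run`
def pvStepB (st : Int × Int × Option Int) (d : Int) : Int × Int × Option Int :=
  let run := if st.2.2 = some d then st.2.1 + 1 else 1
  let best := if run > st.1 then run else st.1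
  (best, run, some d)

def is_dominating_alt (n : Int) : Bool :=
  -- digits = sorted(int(d) for d in str(n)); int(d) raising (non-digit char) is outside Pre_
  let digits := PySem.List.sorted
    ((PySem.Int.toChars n).filterMap (fun d => PySem.Int.ofChars? [d])) (fun x => x) false
  let st := digits.foldl pvStepB (0, 0, none)
  decide (st.1 > PySem.Int.floordiv (PySem.List.len digits) 2)

-- ===== PRECONDITION & SPEC =====
-- A (and B alike) raises ValueError on negative n: int('-') on the minus sign; those inputs are excluded.
def Pre_is_dominating (n : Int) : Prop := 0 ≤ n
instance (n : Int) : Decidable (Pre_is_dominating n) := by unfold Pre_is_dominating; infer_instance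
def pvWitness_is_dominating : Int := (353)

def Spec_is_dominating (n : Int) (out : Bool) : Prop := out = is_dominating_alt n
instance (n : Int) (out : Bool) : Decidable (Spec_is_dominating n out) := by unfold Spec_is_dominating; infer_instance

-- ===== CLAIM (what is proved, stated in full; the proofs are below) =====
def Claim_equal_is_dominating : Prop := ∀ (n : Int), Dom_is_dominating n → Pre_is_dominating n → Spec_is_dominating n (is_dominating n)

-- ===== LEMMAS AND PROOFS =====

-- maximal multiplicity of an element of l
def pvMaxCnt (l : List Int) : Nat := l.toFinset.sup (fun d => l.count d)

-- digits of str(n)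
def pvIsDigitC (c : Char) : Prop := 48 ≤ c.toNat ∧ c.toNat ≤ 57

lemma pvDigitChar_bounds (k : Nat) (h : k < 10) :
    48 ≤ (Nat.digitChar k).toNat ∧ (Nat.digitChar k).toNat ≤ 57 := by
  interval_cases k <;> decide

lemma pvToDigitsCore_mem : ∀ (fuel n : Nat) (acc : List Char) (c : Char),
    c ∈ Nat.toDigitsCore 10 fuel n acc → c ∈ acc ∨ pvIsDigitC c := by
  intro fuel
  induction fuel with
  | zero => intro n acc c h; exact Or.inl (by simpa [Nat.toDigitsCore] using h)
  | succ f ih =>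
    intro n acc c h
    simp only [Nat.toDigitsCore] at h
    by_cases hz : n / 10 = 0
    · rw [if_pos hz] at h
      rcases List.mem_cons.mp h with h1 | h2
      · exact Or.inr (h1 ▸ pvDigitChar_bounds (n % 10) (Nat.mod_lt _ (by norm_num)))
      · exact Or.inl h2
    · rw [if_neg hz] at h
      rcases ih (n / 10) _ c h with h1 | h2
      · rcases List.mem_cons.mp h1 with h3 | h4
        · exact Or.inr (h3 ▸ pvDigitChar_bounds (n % 10) (Nat.mod_lt _ (by norm_num)))
        · exact Or.inl h4
      · exact Or.inr h2

lemma pvToDigitsCore_ne_nil : ∀ (fuel n : Nat) (acc : List Char), acc ≠ [] →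
    Nat.toDigitsCore 10 fuel n acc ≠ [] := by
  intro fuel
  induction fuel with
  | zero => intro n acc h; simpa [Nat.toDigitsCore]
  | succ f ih =>
    intro n acc h
    simp only [Nat.toDigitsCore]
    by_cases hz : n / 10 = 0
    · rw [if_pos hz]; simp
    · rw [if_neg hz]; exact ih _ _ (by simp)

lemma pvToDigits_ne_nil (m : Nat) : Nat.toDigits 10 m ≠ [] := by
  show Nat.toDigitsCore 10 (m + 1) m [] ≠ []
  simp only [Nat.toDigitsCore]
  by_cases hz : m / 10 = 0
  · rw [if_pos hz]; simp
  · rw [if_neg hz]; exact pvToDigitsCore_ne_nil _ _ _ (by simp)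

lemma pvToDigits_mem (m : Nat) (c : Char) (h : c ∈ Nat.toDigits 10 m) : pvIsDigitC c := by
  rcases pvToDigitsCore_mem (m + 1) m [] c h with h1 | h2
  · simp at h1
  · exact h2

-- int(d) for a digit character d
lemma pvOfChars_digit (c : Char) (h : pvIsDigitC c) :
    PySem.Int.ofChars? [c] = some ((c.toNat : Int) - 48) := by
  obtain ⟨h1, h2⟩ := h
  have hc := Char.ofNat_toNat c
  interval_cases hh : c.toNat <;> (rw [← hc]; decide)

def pvVal (c : Char) : Int := (c.toNat : Int) - 48

def pvPk (i : Nat) : Char → Bool := fun c => c.toNat == 48 + i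

lemma pvFoldlA (l : List Char) : ∀ (acc : List Int), (∀ c ∈ l, pvIsDigitC c) → acc.length = 10 →
    (l.foldl pvStepA acc).length = 10 ∧
    ∀ i, i < 10 → (l.foldl pvStepA acc).getD i 0 = acc.getD i 0 + (l.countP (pvPk i) : Int) := by
  induction l with
  | nil => intro acc _ hlen; simpa using hlen
  | cons x xs ih =>
    intro acc hdig hlen
    have hx := hdig x (by simp)
    obtain ⟨hx1, hx2⟩ := hx
    have hnat : ((x.toNat : Int) - 48).toNat = x.toNat - 48 := by omega
    have hstep : pvStepA acc x = acc.set (x.toNat - 48) (acc.getD (x.toNat - 48) 0 + 1) := by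
      simp [pvStepA, pvOfChars_digit x ⟨hx1, hx2⟩, hnat]
    have hlen' : (acc.set (x.toNat - 48) (acc.getD (x.toNat - 48) 0 + 1)).length = 10 := by
      simpa using hlen
    obtain ⟨hL, hG⟩ := ih _ (fun c hc => hdig c (by simp [hc])) hlen'
    refine ⟨by simpa [List.foldl_cons, hstep] using hL, ?_⟩
    intro i hi
    have hj : x.toNat - 48 < 10 := by omega
    have hset : (acc.set (x.toNat - 48) (acc.getD (x.toNat - 48) 0 + 1)).getD i 0 =
        (if x.toNat - 48 = i then acc.getD i 0 + 1 else acc.getD i 0) := by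
      by_cases hij : x.toNat - 48 = i
      · subst hij
        simp [List.getD_eq_getElem?_getD,
          (show x.toNat - 48 < acc.length by omega)]
      · simp [List.getD_eq_getElem?_getD, hij]
    have hcnt : ((x :: xs).countP (pvPk i) : Int) =
        (xs.countP (pvPk i) : Int) + (if x.toNat - 48 = i then 1 else 0) := by
      rw [List.countP_cons]
      by_cases hib : x.toNat - 48 = i
      · have hb : pvPk i x = true := by simp [pvPk]; omega
        simp [hb, hib]
      · have hb : pvPk i x = false := by simp [pvPk]; omega
        simp [hb, hib]
    rw [List.foldl_cons, hstep, hG i hi, hset, hcnt]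
    split_ifs <;> ring

-- multiplicity of an int value in the mapped digit list = countP of the matching chars
lemma pvCount_map_val (l : List Char) (hdig : ∀ c ∈ l, pvIsDigitC c)
    (i : Nat) (_hi : i < 10) :
    (l.map pvVal).count ((i : Nat) : Int) = l.countP (pvPk i) := by
  rw [List.count, List.countP_map]
  apply List.countP_congr
  intro c hc
  obtain ⟨h1, h2⟩ := hdig c hc
  simp only [Function.comp, pvVal, pvPk, beq_iff_eq]
  omega

-- one step of the scan, on a repeated and on a fresh digit
lemma pvStepB_same (b r k : Int) :
    pvStepB (b, r, some k) k = (max b (r + 1), r + 1, some k) := by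
  simp only [pvStepB]
  split_ifs <;> simp only [Prod.mk.injEq, and_true] <;> omega

lemma pvStepB_new (b r : Int) (p : Option Int) (d : Int) (hp : p ≠ some d) :
    pvStepB (b, r, p) d = (max b 1, 1, some d) := by
  simp only [pvStepB, if_neg hp]
  split_ifs <;> simp only [Prod.mk.injEq, and_true] <;> omega

-- run continuation: prev already equals k
lemma pvRunCont : ∀ (m : Nat) (b r k : Int),
    List.foldl pvStepB (b, r, some k) (List.replicate (m + 1) k) =
      (max b (r + (m : Int) + 1), r + (m : Int) + 1, some k) := by
  intro m
  induction m with
  | zero =>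
    intro b r k
    simp only [List.replicate_succ, List.replicate_zero, List.foldl_cons, List.foldl_nil,
      pvStepB_same]
    norm_num
  | succ m ih =>
    intro b r k
    rw [List.replicate_succ, List.foldl_cons, pvStepB_same, ih]
    simp only [Prod.mk.injEq, and_true]
    push_cast
    refine ⟨by omega, by ring⟩

-- fresh run: prev differs from k, so the first k resets the run to 1
lemma pvRunFresh (m : Nat) (b r : Int) (p : Option Int) (k : Int) (hp : p ≠ some k) :
    List.foldl pvStepB (b, r, p) (List.replicate (m + 1) k) =
      (max b ((m : Int) + 1), (m : Int) + 1, some k) := by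
  rw [List.replicate_succ, List.foldl_cons, pvStepB_new b r p k hp]
  cases m with
  | zero => norm_num
  | succ m =>
    rw [pvRunCont]
    simp only [Prod.mk.injEq, and_true]
    push_cast
    refine ⟨by omega, by ring⟩

-- the scan over a sorted list computes max b (maximal multiplicity)
lemma pvScanSorted : ∀ (N : Nat) (l : List Int), l.length ≤ N → l.Pairwise (· ≤ ·) →
    ∀ (b r : Int) (p : Option Int),
    0 ≤ b → (∀ x ∈ l, ∀ q, p = some q → q < x) →
    (List.foldl pvStepB (b, r, p) l).1 = max b ((pvMaxCnt l : Nat) : Int) := by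
  intro N
  induction N with
  | zero =>
    intro l hlen _ b r p hb _
    have : l = [] := List.eq_nil_of_length_eq_zero (by omega)
    subst this
    simp [pvMaxCnt]
    omega
  | succ N ih =>
    intro l hlen hsort b r p hb hfar
    match l with
    | [] => simp [pvMaxCnt]; omega
    | k :: t =>
      have hkt : ∀ x ∈ t, k ≤ x := fun x hx => List.rel_of_pairwise_cons hsort hx
      have htsort : t.Pairwise (· ≤ ·) := hsort.of_cons
      -- group decomposition: the leading block of k's and the rest
      set tw := (k :: t).takeWhile (fun x => x == k) with htw
      set dw := (k :: t).dropWhile (fun x => x == k) with hdw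
      have hsplit : tw ++ dw = k :: t := List.takeWhile_append_dropWhile
      have htwmem : ∀ x ∈ tw, x = k := by
        intro x hx
        have := List.mem_takeWhile_imp hx
        simpa using this
      have htwrep : tw = List.replicate tw.length k :=
        List.eq_replicate_of_mem htwmem
      have htwpos : 0 < tw.length := by
        have : tw = k :: t.takeWhile (fun x => x == k) := by
          rw [htw, List.takeWhile_cons_of_pos (by simp)]
        rw [this]; simp
      have hdwsub : dw.Sublist (k :: t) := by
        rw [hdw]; exact List.dropWhile_sublist _
      -- the rest dw contains no k, so every element of dw is > k
      have hknotdw : k ∉ dw := by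
        intro hk'
        obtain ⟨d0, rest, hh⟩ : ∃ d0 rest, dw = d0 :: rest := by
          cases hcc : dw with
          | nil => rw [hcc] at hk'; simp at hk'
          | cons a b => exact ⟨a, b, rfl⟩
        have hdwsort : dw.Pairwise (· ≤ ·) := hsort.sublist hdwsub
        have hd0ne : d0 ≠ k := by
          have := List.head?_dropWhile_not (fun x => x == k) (k :: t)
          rw [← hdw, hh] at this
          simpa using this
        have hd0le : d0 ≤ k := by
          have hkm : k ∈ d0 :: rest := hh ▸ hk'
          rcases List.mem_cons.mp hkm with h | h
          · omega
          · exact List.rel_of_pairwise_cons (hh ▸ hdwsort) h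
        have hd0ge : k ≤ d0 := by
          have hd0mem : d0 ∈ k :: t := hdwsub.mem (by rw [hh]; simp)
          rcases List.mem_cons.mp hd0mem with h | h
          · omega
          · exact hkt _ h
        exact hd0ne (by omega)
      have hdwgt : ∀ x ∈ dw, k < x := by
        intro x hx
        rcases List.mem_cons.mp (hdwsub.mem hx) with h | h
        · exact absurd (by rwa [h] at hx) hknotdw
        · rcases lt_or_eq_of_le (hkt _ h) with h2 | h2
          · exact h2
          · exact absurd (by rwa [← h2] at hx) hknotdw
      have hdwsort : dw.Pairwise (· ≤ ·) := hsort.sublist hdwsub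
      -- count bookkeeping
      have hcountk : (k :: t).count k = tw.length := by
        rw [← hsplit, List.count_append]
        rw [htwrep, List.count_replicate]
        simp [List.count_eq_zero.mpr hknotdw]
      have hcountd : ∀ d ∈ dw, (k :: t).count d = dw.count d := by
        intro d hd
        rw [← hsplit, List.count_append, htwrep, List.count_replicate]
        have : ¬ (k == d) = true := by
          have := hdwgt d hd; simp; omega
        simp [this]
      -- pvMaxCnt decomposition
      obtain ⟨m, hm⟩ : ∃ m, tw.length = m + 1 := ⟨tw.length - 1, by omega⟩
      have hfin : (k :: t).toFinset = insert k dw.toFinset := by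
        rw [← hsplit, List.toFinset_append, htwrep, hm]
        simp [List.toFinset_replicate_of_ne_zero]
      have hmax : pvMaxCnt (k :: t) = max tw.length (pvMaxCnt dw) := by
        unfold pvMaxCnt
        rw [hfin, Finset.sup_insert, hcountk]
        congr 1
        apply Finset.sup_congr rfl
        intro d hd
        exact hcountd d (List.mem_toFinset.mp hd)
      -- run the scan over the two pieces
      have hpne : p ≠ some k := by
        intro h
        have := hfar k (by simp) k h
        omega
      have hfold : List.foldl pvStepB (b, r, p) (k :: t) =
          List.foldl pvStepB (max b ((m : Int) + 1), (m : Int) + 1, some k) dw := by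
        rw [← hsplit, List.foldl_append, htwrep, hm, pvRunFresh m b r p k hpne]
      have hdwlen : dw.length ≤ N := by
        have h2 := congrArg List.length hsplit
        rw [List.length_append] at h2
        omega
      rw [hfold, ih dw hdwlen hdwsort _ _ _ (by positivity)
        (fun x hx q hq => by rw [Option.some_inj.mp hq.symm] at *; exact hdwgt x hx)]
      rw [hmax, hm]
      push_cast
      omega

-- ===== VERDICT (by name: the statement is the Claim_ definition above) =====
theorem is_dominating_spec : Claim_equal_is_dominating := by
  intro n _ hn
  unfold Spec_is_dominating
  simp only [is_dominating, is_dominating_alt]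
  have hl : PySem.Int.toChars n = Nat.toDigits 10 n.toNat := by
    simp [PySem.Int.toChars, not_lt.mpr hn]
  set l := PySem.Int.toChars n with hldef
  have hne : l ≠ [] := by rw [hl]; exact pvToDigits_ne_nil _
  have hdig : ∀ c ∈ l, pvIsDigitC c := by
    intro c hc; exact pvToDigits_mem _ c (hl ▸ hc)
  -- B's digit list
  have hfm : l.filterMap (fun d => PySem.Int.ofChars? [d]) = l.map pvVal := by
    rw [List.filterMap_eq_map_iff_forall_eq_some.mpr]
    intro c hc
    exact pvOfChars_digit c (hdig c hc) ▸ rfl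
  rw [hfm]
  set ml := l.map pvVal with hmldef
  set digits := PySem.List.sorted ml (fun x => x) false with hdigits
  have hperm : digits.Perm ml := PySem.List.sorted_perm ml (fun x => x) false
  have hdsort : digits.Pairwise (· ≤ ·) := PySem.List.sorted_pairwise ml (fun x => x)
  -- B's best run = maximal multiplicity
  have hbest : (digits.foldl pvStepB (0, 0, none)).1 = ((pvMaxCnt digits : Nat) : Int) := by
    rw [pvScanSorted digits.length digits le_rfl hdsort 0 0 none le_rfl
      (fun x _ q hq => by cases hq)]
    omega
  have hMeq : pvMaxCnt digits = pvMaxCnt ml := by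
    unfold pvMaxCnt
    rw [List.toFinset_eq_of_perm _ _ hperm]
    exact Finset.sup_congr rfl (fun d _ => hperm.count_eq d)
  -- A's tally
  obtain ⟨hclen, hcget⟩ := pvFoldlA l (List.replicate 10 (0 : Int)) hdig (by simp)
  set counts := l.foldl pvStepA (List.replicate 10 (0 : Int)) with hcdef
  have hget : ∀ i, i < 10 → counts.getD i 0 = ((l.countP (pvPk i) : Nat) : Int) := by
    intro i hi
    have h0 : (List.replicate 10 (0 : Int)).getD i 0 = 0 := by
      interval_cases i <;> rfl
    have := hcget i hi
    rw [h0, zero_add] at this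
    exact this
  obtain ⟨mA, hA⟩ : ∃ m, PySem.List.max? counts (fun x => x) = some m := by
    rcases h : PySem.List.max? counts (fun x => x) with _ | m
    · exact absurd ((PySem.List.max?_eq_none_iff _ _).mp h)
        (by intro hc; rw [hc] at hclen; simp at hclen)
    · exact ⟨m, rfl⟩
  have hAmem := PySem.List.max?_mem hA
  have hAmax := PySem.List.max?_isMax hA
  -- A's max tally = maximal multiplicity
  have hmain : mA = ((pvMaxCnt ml : Nat) : Int) := by
    obtain ⟨k, hk, hke⟩ := List.mem_iff_getElem.mp hAmem
    rw [hclen] at hk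
    have hmAv : mA = ((l.countP (pvPk k) : Nat) : Int) := by
      rw [← hke, ← List.getD_eq_getElem counts 0 (by omega), hget k hk]
    apply le_antisymm
    · -- mA ≤ pvMaxCnt ml
      by_cases hz : l.countP (pvPk k) = 0
      · rw [hmAv, hz]
        exact_mod_cast Int.natCast_nonneg _
      · have hcntk : ml.count ((k : Nat) : Int) = l.countP (pvPk k) :=
          pvCount_map_val l hdig k hk
        have hmem : ((k : Nat) : Int) ∈ ml := by
          rw [← List.count_pos_iff, hcntk]
          omega
        have := Finset.le_sup (f := fun d => ml.count d) (List.mem_toFinset.mpr hmem)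
        rw [hmAv, ← hcntk]
        exact_mod_cast this
    · -- pvMaxCnt ml ≤ mA
      rw [hmAv]
      have : pvMaxCnt ml ≤ l.countP (pvPk k) := by
        apply Finset.sup_le
        intro d hd
        obtain ⟨c, hc, hcd⟩ := List.mem_map.mp (List.mem_toFinset.mp hd)
        obtain ⟨h1, h2⟩ := hdig c hc
        set i := c.toNat - 48 with hi
        have hilt : i < 10 := by omega
        have hdi : d = ((i : Nat) : Int) := by rw [← hcd]; simp only [pvVal]; omega
        rw [hdi, pvCount_map_val l hdig i hilt]
        have hmemc : counts.getD i 0 ∈ counts := by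
          rw [List.getD_eq_getElem counts 0 (by omega)]
          exact List.getElem_mem _
        have := hAmax _ hmemc
        rw [hget i hilt, hmAv] at this
        exact_mod_cast this
      exact_mod_cast this
  -- lengths agree
  have hlen : PySem.List.len digits = (l.length : Int) := by
    rw [PySem.List.len_eq, hdigits, PySem.List.length_sorted, hmldef, List.length_map]
  rw [hA, hbest, hMeq, ← hmain, hlen]
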